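-- pv_equiv track=rewrite | github.com/JoelJimenez23/retro-risc-machine | image_vga/main.py | split_rect_pixels
-- ===== SOURCE A (Python) =====
-- def split_rect_pixels(x: int, y: int, w: int, h: int, c: int, maxw: int, maxh: int):
--     """
--     Split para asegurar w<=maxw y h<=maxh (por 4 bits => 15).
--     """
--     out = []
--     yy = y
--     hh = h
--     while hh > 0:
--         hch = min(hh, maxh)
--         xx = x
--         ww = w
--         while ww > 0:
--             wch = min(ww, maxw)
--             out.append((xx, yy, wch, hch, c))
--             xx += wch
--             ww -= wch
--         yy += hch
--         hh -= hch
--     return out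
-- ===== SOURCE B (Python) =====
-- def split_rect_pixels(x: int, y: int, w: int, h: int, c: int, maxw: int, maxh: int):
--     # Closed-form tiling: count the tiles per axis with ceiling division,
--     # then compute each tile's origin and size directly from its index.
--     if h <= 0:
--         return []
--     nrows = (h + maxh - 1) // maxh
--     ncols = (w + maxw - 1) // maxw if w > 0 else 0
--     out = []
--     for i in range(nrows):
--         yy = y + i * maxh
--         hch = min(maxh, h - i * maxh)
--         for j in range(ncols):
--             xx = x + j * maxw
--             out.append((xx, yy, min(maxw, w - j * maxw), hch, c))
--     return out
-- ===== Notes on version B (the rewrite author's own statement) =====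
-- stated objective: alternative
-- what changed: Replaces A's greedy subtract-the-remainder while loops with a closed-form tiling: the number of tiles per axis is computed once by ceiling division and each tile's origin and size are derived arithmetically from its index, so no running remainder or position state is carried.
import Mathlib
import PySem

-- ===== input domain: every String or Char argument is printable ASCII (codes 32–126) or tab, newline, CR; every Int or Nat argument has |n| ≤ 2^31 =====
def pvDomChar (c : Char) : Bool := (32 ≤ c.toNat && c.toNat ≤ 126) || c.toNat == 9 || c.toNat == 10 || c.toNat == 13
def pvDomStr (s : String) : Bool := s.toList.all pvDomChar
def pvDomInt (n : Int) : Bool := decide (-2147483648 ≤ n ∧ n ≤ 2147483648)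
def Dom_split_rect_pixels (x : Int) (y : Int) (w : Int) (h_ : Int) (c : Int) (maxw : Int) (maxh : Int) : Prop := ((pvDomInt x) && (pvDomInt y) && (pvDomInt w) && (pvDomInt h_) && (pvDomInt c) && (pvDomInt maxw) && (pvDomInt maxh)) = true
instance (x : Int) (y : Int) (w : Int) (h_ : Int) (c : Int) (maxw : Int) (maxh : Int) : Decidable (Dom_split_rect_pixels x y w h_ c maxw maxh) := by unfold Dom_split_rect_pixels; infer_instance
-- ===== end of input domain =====

-- B replaces A's greedy subtract-the-remainder while loops by a closed-form tiling:
-- tile counts by ceiling division, each tile's origin/size computed from its index.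
-- Pre_ excludes exactly the inputs on which A's while loops never terminate.


-- ===== PORT A =====
-- inner 'while ww > 0' loop; fuel w.toNat suffices whenever the loop terminates (Pre_)
def pvInnerA (fuel : Nat) (xx ww yy hch c maxw : Int)
    (out : List (Int × Int × Int × Int × Int)) : List (Int × Int × Int × Int × Int) :=
  match fuel with
  | 0 => out
  | f + 1 =>
    if ww > 0 then
      let wch := min ww maxw
      pvInnerA f (xx + wch) (ww - wch) yy hch c maxw (out ++ [(xx, yy, wch, hch, c)])
    else out

-- outer 'while hh > 0' loop; fuel h_.toNat suffices whenever the loop terminates (Pre_)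
def pvOuterA (fuel : Nat) (yy hh x w c maxw maxh : Int)
    (out : List (Int × Int × Int × Int × Int)) : List (Int × Int × Int × Int × Int) :=
  match fuel with
  | 0 => out
  | f + 1 =>
    if hh > 0 then
      let hch := min hh maxh
      pvOuterA f (yy + hch) (hh - hch) x w c maxw maxh (pvInnerA w.toNat x w yy hch c maxw out)
    else out

def split_rect_pixels (x : Int) (y : Int) (w : Int) (h_ : Int) (c : Int) (maxw : Int) (maxh : Int) : List (Int × Int × Int × Int × Int) :=
  pvOuterA h_.toNat y h_ x w c maxw maxh []

-- ===== PORT B =====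
def split_rect_pixels_alt (x : Int) (y : Int) (w : Int) (h_ : Int) (c : Int) (maxw : Int) (maxh : Int) : List (Int × Int × Int × Int × Int) :=
  if h_ ≤ 0 then []
  else
    let nrows := PySem.Int.floordiv (h_ + maxh - 1) maxh
    let ncols := if w > 0 then PySem.Int.floordiv (w + maxw - 1) maxw else 0
    (PySem.List.pyRange 0 nrows 1).foldl (fun out i =>
      let yy := y + i * maxh
      let hch := min maxh (h_ - i * maxh)
      (PySem.List.pyRange 0 ncols 1).foldl (fun out j =>
        let xx := x + j * maxw
        out ++ [(xx, yy, min maxw (w - j * maxw), hch, c)]) out) []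

-- ===== PRECONDITION & SPEC =====
-- Pre_ excludes exactly the inputs on which A's while loops run forever
-- (h > 0 with maxh ≤ 0, or h > 0 and w > 0 with maxw ≤ 0); A never raises.
def Pre_split_rect_pixels (x : Int) (y : Int) (w : Int) (h_ : Int) (c : Int) (maxw : Int) (maxh : Int) : Prop :=
  h_ ≤ 0 ∨ (0 < maxh ∧ (w ≤ 0 ∨ 0 < maxw))
instance (x : Int) (y : Int) (w : Int) (h_ : Int) (c : Int) (maxw : Int) (maxh : Int) : Decidable (Pre_split_rect_pixels x y w h_ c maxw maxh) := by unfold Pre_split_rect_pixels; infer_instance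

def pvWitness_split_rect_pixels : Int × Int × Int × Int × Int × Int × Int := (2, 3, 20, 9, 7, 15, 4)

def Spec_split_rect_pixels (x : Int) (y : Int) (w : Int) (h_ : Int) (c : Int) (maxw : Int) (maxh : Int) (out : List (Int × Int × Int × Int × Int)) : Prop := out = split_rect_pixels_alt x y w h_ c maxw maxh
instance (x : Int) (y : Int) (w : Int) (h_ : Int) (c : Int) (maxw : Int) (maxh : Int) (out : List (Int × Int × Int × Int × Int)) : Decidable (Spec_split_rect_pixels x y w h_ c maxw maxh out) := by unfold Spec_split_rect_pixels; infer_instance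

-- ===== CLAIM (what is proved, stated in full; the proofs are below) =====
def Claim_equal_split_rect_pixels : Prop := ∀ (x : Int) (y : Int) (w : Int) (h_ : Int) (c : Int) (maxw : Int) (maxh : Int), Dom_split_rect_pixels x y w h_ c maxw maxh → Pre_split_rect_pixels x y w h_ c maxw maxh → Spec_split_rect_pixels x y w h_ c maxw maxh (split_rect_pixels x y w h_ c maxw maxh)

-- ===== LEMMAS AND PROOFS =====

-- proof-side abstraction of A's greedy 1-D chunking
def pvSegs (fuel : Nat) (pos rem mx : Int) : List (Int × Int) :=
  match fuel with
  | 0 => []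
  | f + 1 =>
    if rem > 0 then
      let ch := min rem mx
      (pos, ch) :: pvSegs f (pos + ch) (rem - ch) mx
    else []

theorem pvSegs_nonpos (fuel : Nat) (pos rem mx : Int) (h : rem ≤ 0) :
    pvSegs fuel pos rem mx = [] := by
  cases fuel with
  | zero => simp [pvSegs]
  | succ f => simp [pvSegs]; omega

theorem pvInnerA_eq (fuel : Nat) (xx ww yy hch c maxw : Int)
    (out : List (Int × Int × Int × Int × Int)) :
    pvInnerA fuel xx ww yy hch c maxw out
      = out ++ (pvSegs fuel xx ww maxw).map (fun cseg => (cseg.1, yy, cseg.2, hch, c)) := by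
  induction fuel generalizing xx ww out with
  | zero => simp [pvInnerA, pvSegs]
  | succ f ih =>
    simp only [pvInnerA, pvSegs]
    split_ifs with hpos
    · rw [ih]; simp
    · simp

theorem pvOuterA_eq (fuel : Nat) (yy hh x w c maxw maxh : Int)
    (out : List (Int × Int × Int × Int × Int)) :
    pvOuterA fuel yy hh x w c maxw maxh out
      = out ++ (pvSegs fuel yy hh maxh).flatMap
          (fun r => (pvSegs w.toNat x w maxw).map (fun cseg => (cseg.1, r.1, cseg.2, r.2, c))) := by
  induction fuel generalizing yy hh out with
  | zero => simp [pvOuterA, pvSegs]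
  | succ f ih =>
    simp only [pvOuterA, pvSegs]
    split_ifs with hpos
    · rw [ih, pvInnerA_eq]; simp
    · simp

-- the greedy chunking IS the closed-form tiling (mx > 0, enough fuel)
theorem pvSegs_closed (mx : Int) (hmx : 0 < mx) :
    ∀ (fuel : Nat) (pos rem : Int), rem.toNat ≤ fuel → 0 < rem →
    pvSegs fuel pos rem mx
      = (PySem.List.pyRange 0 (PySem.Int.floordiv (rem + mx - 1) mx) 1).map
          (fun i => (pos + i * mx, min mx (rem - i * mx))) := by
  intro fuel
  induction fuel with
  | zero => intro pos rem hf hr; omega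
  | succ f ih =>
    intro pos rem hf hr
    by_cases h1 : rem ≤ mx
    · have hn : PySem.Int.floordiv (rem + mx - 1) mx = 1 :=
        (PySem.Int.floordiv_eq_iff_of_pos hmx).mpr ⟨by omega, by omega⟩
      have hr1 : PySem.List.pyRange 0 1 1 = [(0 : Int)] := by decide
      rw [hn, hr1]
      simp only [pvSegs, if_pos hr, List.map_cons, List.map_nil]
      rw [pvSegs_nonpos _ _ _ _ (by omega)]
      have h2 : pos + 0 * mx = pos := by ring
      have h3 : min mx (rem - 0 * mx) = min rem mx := by omega
      rw [h2, h3]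
    · push_neg at h1
      set q' := PySem.Int.floordiv (rem - mx + mx - 1) mx with hq'eq
      have hq' : q' * mx ≤ rem - mx + mx - 1 ∧ rem - mx + mx - 1 < (q' + 1) * mx :=
        (PySem.Int.floordiv_eq_iff_of_pos hmx).mp hq'eq.symm
      have hq'nonneg : 0 ≤ q' := by nlinarith [hq'.1, hq'.2]
      have hn : PySem.Int.floordiv (rem + mx - 1) mx = q' + 1 :=
        (PySem.Int.floordiv_eq_iff_of_pos hmx).mpr ⟨by nlinarith [hq'.1], by nlinarith [hq'.2]⟩
      rw [hn]
      simp only [pvSegs, if_pos hr]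
      have hch : min rem mx = mx := by omega
      rw [hch]
      have hfu : (rem - mx).toNat ≤ f := by omega
      have hpos2 : 0 < rem - mx := by omega
      rw [ih (pos + mx) (rem - mx) hfu hpos2, ← hq'eq]
      conv_rhs => rw [PySem.List.pyRange_one_cons (show (0 : Int) < q' + 1 by omega)]
      simp only [List.map_cons]
      congr 1
      · have h2 : pos + 0 * mx = pos := by ring
        have h3 : min mx (rem - 0 * mx) = mx := by omega
        rw [h2, h3]
      · rw [PySem.List.pyRange_one, PySem.List.pyRange_one]
        simp only [List.map_map]
        have hlen : (q' + 1 - (0 + 1)).toNat = (q' - 0).toNat := by omega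
        rw [hlen]
        refine List.map_congr_left ?_
        intro k _
        simp only [Function.comp_apply, Prod.mk.injEq]
        refine ⟨by ring, ?_⟩
        have h4 : rem - mx - (0 + (k : Int)) * mx = rem - (0 + 1 + (k : Int)) * mx := by ring
        rw [h4]

-- nested append-fold over two index ranges is the flatMap of maps
theorem pvFoldl2_flatMap {α : Type} (t : Int → Int → α) (rows cols : List Int) :
    rows.foldl (fun out i => cols.foldl (fun out j => out ++ [t i j]) out) []
      = rows.flatMap (fun i => cols.map (t i)) := by
  have hb : (fun (out : List α) (i : Int) => cols.foldl (fun out j => out ++ [t i j]) out)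
      = fun out i => out ++ cols.map (t i) := by
    funext out i
    exact PySem.List.foldl_append_singleton_eq_map _ _ _
  rw [hb, PySem.List.foldl_append_eq_flatMap]
  simp

-- B's nested index-loops written as flatMap of maps
theorem altB_eq (x y w h_ c maxw maxh : Int) :
    split_rect_pixels_alt x y w h_ c maxw maxh =
      if h_ ≤ 0 then []
      else
        (PySem.List.pyRange 0 (PySem.Int.floordiv (h_ + maxh - 1) maxh) 1).flatMap (fun i =>
          (PySem.List.pyRange 0 (if w > 0 then PySem.Int.floordiv (w + maxw - 1) maxw else 0) 1).map
            (fun j => (x + j * maxw, y + i * maxh, min maxw (w - j * maxw), min maxh (h_ - i * maxh), c))) := by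
  by_cases hh0 : h_ ≤ 0
  · simp [split_rect_pixels_alt, hh0]
  · unfold split_rect_pixels_alt
    rw [if_neg hh0, if_neg hh0]
    exact pvFoldl2_flatMap
      (fun i j => (x + j * maxw, y + i * maxh, min maxw (w - j * maxw), min maxh (h_ - i * maxh), c))
      _ _

-- ===== VERDICT (by name: the statement is the Claim_ definition above) =====
theorem split_rect_pixels_spec : Claim_equal_split_rect_pixels := by
  intro x y w h_ c maxw maxh _ hpre
  unfold Spec_split_rect_pixels split_rect_pixels
  rw [pvOuterA_eq, altB_eq]
  simp only [List.nil_append]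
  by_cases hh0 : h_ ≤ 0
  · rw [pvSegs_nonpos _ _ _ _ hh0, if_pos hh0]
    simp
  · push_neg at hh0
    rw [if_neg (by omega)]
    have hmh : 0 < maxh := by
      rcases hpre with h | ⟨h, _⟩
      · omega
      · exact h
    rw [pvSegs_closed maxh hmh h_.toNat y h_ (le_refl _) hh0]
    by_cases hw : 0 < w
    · have hmw : 0 < maxw := by
        rcases hpre with h | ⟨_, h | h⟩
        · omega
        · omega
        · exact h
      rw [pvSegs_closed maxw hmw w.toNat x w (le_refl _) hw, if_pos hw]
      simp [List.flatMap_map, List.map_map, Function.comp_def]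
    · rw [pvSegs_nonpos _ _ _ _ (by omega), if_neg hw]
      have hnil : ∀ {β : Type} (l : List β),
          l.flatMap (fun _ => ([] : List (Int × Int × Int × Int × Int))) = [] := by
        intro β l; simp
      rw [PySem.List.pyRange_one_eq_nil (le_refl (0 : Int))]
      simp [hnil]
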